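-- pv_equiv track=rewrite | github.com/mangowhoiscloud/geode | core/cli/_helpers.py | is_glm_key
-- ===== SOURCE A (Python) =====
-- def is_glm_key(value: str) -> bool:
--     """Detect ZhipuAI API key pattern: {id}.{secret} (e.g. abc12345.def67890).
--
--     GLM keys consist of two dot-separated ASCII alphanumeric segments,
--     each at least 4 chars. Rejects emails, URLs, and natural-language text.
--     """
--     if "." not in value:
--         return False
--     # GLM keys are pure ASCII alphanumeric + dot — reject @, non-ASCII, etc.
--     if "@" in value or not value.isascii():
--         return False
--     parts = value.split(".", 1)
--     if len(parts) != 2 or not all(len(p) >= 4 for p in parts):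
--         return False
--     # Each segment must be alphanumeric with at least one digit (machine-generated)
--     return all(p.isalnum() and any(c.isdigit() for c in p) for p in parts)
-- ===== SOURCE B (Python) =====
-- def _alnum(c):
--     return '0' <= c <= '9' or 'a' <= c <= 'z' or 'A' <= c <= 'Z'
--
--
-- def is_glm_key(value: str) -> bool:
--     """Single left-to-right scan instead of substring tests + split + per-segment passes."""
--     seg_len = 0
--     has_digit = False
--     seen_dot = False
--     for c in value:
--         if c == '.':
--             if seen_dot:
--                 return False
--             if not (seg_len >= 4 and has_digit):
--                 return False
--             seg_len = 0
--             has_digit = False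
--             seen_dot = True
--         elif _alnum(c):
--             seg_len += 1
--             has_digit = has_digit or ('0' <= c <= '9')
--         else:
--             return False
--     return seen_dot and seg_len >= 4 and has_digit
-- ===== Notes on version B (the rewrite author's own statement) =====
-- stated objective: alternative
-- what changed: Replaced the substring tests, isascii scan, two-way dot split and per-segment all/any passes with a single left-to-right character scan (a small state machine tracking segment length, digit-seen and dot-seen) that rejects at the first offending character.
import Mathlib
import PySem

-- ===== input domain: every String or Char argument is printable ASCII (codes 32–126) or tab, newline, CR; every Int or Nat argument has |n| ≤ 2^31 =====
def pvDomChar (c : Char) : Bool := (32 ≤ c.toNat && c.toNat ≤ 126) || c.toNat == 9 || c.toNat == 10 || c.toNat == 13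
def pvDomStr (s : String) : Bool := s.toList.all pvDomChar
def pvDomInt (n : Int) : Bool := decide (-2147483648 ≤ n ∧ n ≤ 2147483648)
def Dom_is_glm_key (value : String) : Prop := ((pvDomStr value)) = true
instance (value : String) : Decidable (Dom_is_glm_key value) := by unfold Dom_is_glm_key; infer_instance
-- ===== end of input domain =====

-- B replaces A's substring tests + split + per-segment passes with one left-to-right scan; equal on all inputs.

-- ===== PORT A =====
def is_glm_key (value : String) : Bool :=
  if !PySem.Str.isIn "." value then false
  else if PySem.Str.isIn "@" value || !(value.toList.all (fun c => decide (c.toNat < 128))) then false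
    -- str.isascii() ported by hand (exact: ASCII = code point < 128); PySem has no isascii
  else
    let parts := (PySem.Str.splitMax? value "." 1).getD []  -- sep "." ≠ "", so splitMax? is never none
    if !(parts.length == 2 && parts.all (fun p => decide (4 ≤ PySem.Str.len p))) then false
    else parts.all (fun p => PySem.Str.strIsalnum p && p.toList.any (fun c => PySem.Chars.isdigit c))

-- ===== PORT B =====
def pvAlnumAscii (c : Char) : Bool :=
  (decide ('0' ≤ c) && decide (c ≤ '9')) || (decide ('a' ≤ c) && decide (c ≤ 'z')) ||
    (decide ('A' ≤ c) && decide (c ≤ 'Z'))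

def pvScan : List Char → Nat → Bool → Bool → Bool
  | [], segLen, hasDigit, seenDot => seenDot && decide (4 ≤ segLen) && hasDigit
  | c :: rest, segLen, hasDigit, seenDot =>
    if c = '.' then
      if seenDot then false
      else if decide (4 ≤ segLen) && hasDigit then pvScan rest 0 false true
      else false
    else if pvAlnumAscii c then
      pvScan rest (segLen + 1) (hasDigit || (decide ('0' ≤ c) && decide (c ≤ '9'))) seenDot
    else false

def is_glm_key_alt (value : String) : Bool := pvScan value.toList 0 false false

-- ===== PRECONDITION & SPEC =====
def Spec_is_glm_key (value : String) (out : Bool) : Prop := out = is_glm_key_alt value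
instance (value : String) (out : Bool) : Decidable (Spec_is_glm_key value out) := by unfold Spec_is_glm_key; infer_instance

-- ===== CLAIM (what is proved, stated in full; the proofs are below) =====
def Claim_equal_is_glm_key : Prop := ∀ (value : String), Dom_is_glm_key value → Spec_is_glm_key value (is_glm_key value)

-- ===== LEMMAS AND PROOFS =====

def pvDig (c : Char) : Bool := decide ('0' ≤ c) && decide (c ≤ '9')

theorem pv_scan2 (q : List Char) : ∀ (n : Nat) (d : Bool),
    pvScan q n d true = (q.all pvAlnumAscii && decide (4 ≤ n + q.length) && (d || q.any pvDig)) := by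
  induction q with
  | nil => intro n d; simp [pvScan]
  | cons c rest ih =>
    intro n d
    by_cases hc : c = '.'
    · subst hc
      have h0 : pvAlnumAscii '.' = false := by decide
      simp [pvScan, h0]
    · by_cases ha : pvAlnumAscii c = true
      · rw [show pvScan (c :: rest) n d true
              = pvScan rest (n + 1) (d || (decide ('0' ≤ c) && decide (c ≤ '9'))) true from by
          simp [pvScan, hc, ha]]
        rw [ih]
        have h1 : n + 1 + rest.length = n + (rest.length + 1) := by omega
        simp [ha, pvDig, Bool.or_assoc, h1]
        rfl
      · have ha' : pvAlnumAscii c = false := by simpa using ha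
        simp [pvScan, hc, ha']

theorem pv_scan_nodot (l : List Char) : ∀ (n : Nat) (d : Bool), '.' ∉ l → pvScan l n d false = false := by
  induction l with
  | nil => intro n d _; simp [pvScan]
  | cons c rest ih =>
    intro n d h
    have hc : c ≠ '.' := fun hh => h (hh ▸ List.mem_cons_self ..)
    by_cases ha : pvAlnumAscii c = true
    · simp [pvScan, hc, ha, ih _ _ (fun hh => h (List.mem_cons_of_mem _ hh))]
    · have ha' : pvAlnumAscii c = false := by simpa using ha
      simp [pvScan, hc, ha']

theorem pv_scan1 (p : List Char) : ∀ (q : List Char) (n : Nat) (d : Bool), '.' ∉ p →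
    pvScan (p ++ '.' :: q) n d false =
      ((p.all pvAlnumAscii && decide (4 ≤ n + p.length) && (d || p.any pvDig)) && pvScan q 0 false true) := by
  induction p with
  | nil =>
    intro q n d _
    by_cases h4 : (4:Nat) ≤ n <;> by_cases hd : d = true <;> simp_all [pvScan]
  | cons c rest ih =>
    intro q n d hp
    have hc : c ≠ '.' := fun hh => hp (hh ▸ List.mem_cons_self ..)
    by_cases ha : pvAlnumAscii c = true
    · rw [show pvScan ((c :: rest) ++ '.' :: q) n d false
            = pvScan (rest ++ '.' :: q) (n + 1) (d || (decide ('0' ≤ c) && decide (c ≤ '9'))) false from by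
        simp [pvScan, hc, ha]]
      rw [ih q (n+1) _ (fun hh => hp (List.mem_cons_of_mem _ hh))]
      have h1 : n + 1 + rest.length = n + (rest.length + 1) := by omega
      simp [ha, pvDig, Bool.or_assoc, h1]
      rfl
    · have ha' : pvAlnumAscii c = false := by simpa using ha
      simp [pvScan, hc, ha']

theorem pv_first_dot (l : List Char) (h : '.' ∈ l) : ∃ p q, l = p ++ '.' :: q ∧ '.' ∉ p := by
  induction l with
  | nil => simp at h
  | cons c rest ih =>
    by_cases hc : c = '.'
    · exact ⟨[], rest, by simp [hc], by simp⟩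
    · have hr : '.' ∈ rest := by
        rcases List.mem_cons.mp h with h1 | h1
        · exact absurd h1.symm hc
        · exact h1
      obtain ⟨p, q, rfl, hp⟩ := ih hr
      exact ⟨c :: p, q, rfl, by simp [hp, Ne.symm hc]⟩

theorem pv_aln_eq (c : Char) : PySem.Chars.isalnum c = pvAlnumAscii c := by
  simp [PySem.Chars.isalnum, PySem.Chars.isalpha, PySem.Chars.isupper, PySem.Chars.islower,
    PySem.Chars.isdigit, pvAlnumAscii, Bool.or_comm, Bool.or_left_comm, Bool.and_comm]

theorem pv_go_zero (fuel : Nat) (l cur : List Char) (acc : List (List Char)) :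
    PySem.Chars.splitOnMax.go ['.'] fuel 0 l cur acc = ((cur.reverse ++ l) :: acc).reverse := by
  cases fuel with
  | zero => simp [PySem.Chars.splitOnMax.go]
  | succ f => cases l with
    | nil => simp [PySem.Chars.splitOnMax.go]
    | cons c rest => simp [PySem.Chars.splitOnMax.go]

theorem pv_go_dot (p : List Char) : ∀ (fuel : Nat) (q cur : List Char) (acc : List (List Char)),
    '.' ∉ p → p.length + q.length < fuel →
    PySem.Chars.splitOnMax.go ['.'] fuel 1 (p ++ '.' :: q) cur acc =
      (q :: (cur.reverse ++ p) :: acc).reverse := by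
  induction p with
  | nil =>
    intro fuel q cur acc _ hf
    cases fuel with
    | zero => omega
    | succ f =>
      simp only [List.nil_append]
      rw [show PySem.Chars.splitOnMax.go ['.'] (f+1) 1 ('.' :: q) cur acc
            = PySem.Chars.splitOnMax.go ['.'] f 0 (List.drop 1 ('.' :: q)) [] (cur.reverse :: acc) from by
        simp [PySem.Chars.splitOnMax.go, List.isPrefixOf]]
      rw [pv_go_zero]
      simp
  | cons c p ih =>
    intro fuel q cur acc hp hf
    cases fuel with
    | zero => simp at hf
    | succ f =>
      have hc : c ≠ '.' := fun h => hp (h ▸ List.mem_cons_self ..)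
      rw [show PySem.Chars.splitOnMax.go ['.'] (f+1) 1 ((c :: p) ++ '.' :: q) cur acc
            = PySem.Chars.splitOnMax.go ['.'] f 1 (p ++ '.' :: q) (c :: cur) acc from by
        simp [PySem.Chars.splitOnMax.go, List.isPrefixOf, Ne.symm hc]]
      rw [ih f q (c :: cur) acc (fun h => hp (List.mem_cons_of_mem _ h)) (by simp at hf ⊢; omega)]
      simp

theorem pv_split_eq (p q : List Char) (hp : '.' ∉ p) :
    PySem.Chars.splitOnMax (p ++ '.' :: q) ['.'] 1 = [p, q] := by
  unfold PySem.Chars.splitOnMax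
  rw [if_neg (by norm_num)]
  norm_num
  rw [pv_go_dot p _ q [] [] hp (by omega)]
  simp

theorem pv_aln_ascii (c : Char) (h : pvAlnumAscii c = true) : c.toNat < 128 := by
  simp [pvAlnumAscii, Char.le_def, UInt32.le_iff_toNat_le] at h
  have hh : c.toNat = c.val.toNat := rfl
  omega

theorem pv_key_eq (value : String) : is_glm_key value = is_glm_key_alt value := by
  by_cases hdot : '.' ∈ value.toList
  · obtain ⟨p, q, hl, hp⟩ := pv_first_dot _ hdot
    have hin : PySem.Str.isIn "." value = true := by
      rw [show PySem.Str.isIn "." value = PySem.Chars.isIn ['.'] value.toList from rfl]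
      rw [PySem.Chars.isIn_iff_infix]
      exact (List.singleton_infix_iff _ _).mpr hdot
    have hrhs : is_glm_key_alt value =
        ((p.all pvAlnumAscii && decide (4 ≤ p.length) && p.any pvDig) &&
         (q.all pvAlnumAscii && decide (4 ≤ q.length) && q.any pvDig)) := by
      unfold is_glm_key_alt
      rw [hl, pv_scan1 p q 0 false hp, pv_scan2]
      simp
    rw [hrhs]
    unfold is_glm_key
    rw [hin]
    rw [if_neg (by simp)]
    by_cases hbad : (PySem.Str.isIn "@" value || !(value.toList.all (fun c => decide (c.toNat < 128)))) = true
    · rw [if_pos hbad]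
      -- some character of l is '@' or non-ASCII; it sits in p or q and kills the corresponding all
      have hbadc : ∃ c ∈ value.toList, pvAlnumAscii c = false ∧ c ≠ '.' := by
        rcases Bool.or_eq_true_iff.mp hbad with h | h
        · have : '@' ∈ value.toList := by
            have := (PySem.Chars.isIn_iff_infix _ _).mp h
            exact (List.singleton_infix_iff _ _).mp this
          exact ⟨'@', this, by decide, by decide⟩
        · simp at h
          obtain ⟨c, hc, hna⟩ := h
          refine ⟨c, hc, ?_, ?_⟩
          · by_contra hh
            simp at hh
            exact absurd (pv_aln_ascii c hh) (by omega)
          · intro hh; subst hh; simp [Char.toNat] at hna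
      obtain ⟨c, hc, hna, hcd⟩ := hbadc
      rw [hl] at hc
      rcases List.mem_append.mp hc with hcp | hcq
      · have : p.all pvAlnumAscii = false := by
          simp
          exact ⟨c, hcp, by simp [hna]⟩
        simp [this]
      · rcases List.mem_cons.mp hcq with h1 | h1
        · exact absurd h1 hcd
        · have : q.all pvAlnumAscii = false := by
            simp
            exact ⟨c, h1, by simp [hna]⟩
          simp [this]
    · rw [if_neg hbad]
      have hsplit : (PySem.Str.splitMax? value "." 1).getD []
          = [String.ofList p, String.ofList q] := by
        rw [show PySem.Str.splitMax? value "." 1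
              = Option.map (List.map String.ofList) (PySem.Chars.splitMax? value.toList ['.'] 1) from rfl]
        rw [show PySem.Chars.splitMax? value.toList ['.'] 1
              = some (PySem.Chars.splitOnMax value.toList ['.'] 1) from by
          simp [PySem.Chars.splitMax?]]
        rw [hl, pv_split_eq p q hp]
        rfl
      simp only [hsplit]
      by_cases h4p : (4 ≤ p.length)
      · by_cases h4q : (4 ≤ q.length)
        · have hne : p.isEmpty = false := by
            simp; intro hh; subst hh; simp at h4p
          have hne' : q.isEmpty = false := by
            simp; intro hh; subst hh; simp at h4q
          have hfe : PySem.Chars.isalnum = pvAlnumAscii := funext pv_aln_eq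
          have hfd : (fun c => PySem.Chars.isdigit c) = pvDig := rfl
          simp [PySem.Str.len, PySem.Str.strIsalnum, PySem.Chars.strIsalnum, h4p, h4q,
            hne, hne', hfe, hfd, Bool.and_assoc]
        · simp [PySem.Str.len, h4q]
      · simp [PySem.Str.len, h4p]
  · have h1 : PySem.Str.isIn "." value = false := by
      rw [show PySem.Str.isIn "." value = PySem.Chars.isIn ['.'] value.toList from rfl]
      rw [PySem.Chars.isIn_eq_false_iff]
      intro hinf
      exact hdot ((List.singleton_infix_iff _ _).mp hinf)
    unfold is_glm_key is_glm_key_alt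
    rw [h1]
    simp [pv_scan_nodot _ 0 false hdot]

-- ===== VERDICT (by name: the statement is the Claim_ definition above) =====
theorem is_glm_key_spec : Claim_equal_is_glm_key := by
  intro value _
  unfold Spec_is_glm_key
  exact pv_key_eq value
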